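-- pv_equiv track=rewrite | github.com/e-dang/Composite-Peptide-Macrocycle-Generator | macrocycles/utils.py | set_prefix
-- ===== SOURCE A (Python) =====
-- def set_prefix(prefix):
--     """
--     Recursive method for rotating the prefix letter once they reach 'Z'. For example, a prefix 'ZZ' will turn into
--     'AAA'.
--
--     Args:
--         prefix (str): The prefix to be rotated.
--
--     Returns:
--         str: The rotated prefix.
--     """
--
--     # initial prefix assignment
--     if prefix == '':
--         prefix = 'A'
--         return prefix
--
--     # increment last letter of prefix and recursively wrap if necessary
--     ending = ord(prefix[-1]) + 1
--     if ending > ord('Z'):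
--         prefix = set_prefix(prefix[:-1]) if len(prefix) > 1 else 'A'
--         prefix = prefix + 'A'
--         return prefix
--
--     # no recursive wrapping needed
--     prefix = prefix[:-1] + str(chr(ending))
--     return prefix
-- ===== SOURCE B (Python) =====
-- def set_prefix(prefix):
--     """Iterative re-implementation: scan chars right-to-left carrying the wrap."""
--     if prefix == '':
--         return 'A'
--     chars = list(prefix)
--     i = len(chars) - 1
--     while i >= 0:
--         ending = ord(chars[i]) + 1
--         if ending > ord('Z'):
--             chars[i] = 'A'
--             i -= 1
--         else:
--             chars[i] = chr(ending)
--             return ''.join(chars)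
--     return 'A' + ''.join(chars)
-- ===== Notes on version B (the rewrite author's own statement) =====
-- stated objective: alternative
-- what changed: Replaces A's recursion (one call plus a list slice per wrapped character) by a single iterative right-to-left carry scan over the character list, prepending one extra character only once if the carry falls off the front.
import Mathlib
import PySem

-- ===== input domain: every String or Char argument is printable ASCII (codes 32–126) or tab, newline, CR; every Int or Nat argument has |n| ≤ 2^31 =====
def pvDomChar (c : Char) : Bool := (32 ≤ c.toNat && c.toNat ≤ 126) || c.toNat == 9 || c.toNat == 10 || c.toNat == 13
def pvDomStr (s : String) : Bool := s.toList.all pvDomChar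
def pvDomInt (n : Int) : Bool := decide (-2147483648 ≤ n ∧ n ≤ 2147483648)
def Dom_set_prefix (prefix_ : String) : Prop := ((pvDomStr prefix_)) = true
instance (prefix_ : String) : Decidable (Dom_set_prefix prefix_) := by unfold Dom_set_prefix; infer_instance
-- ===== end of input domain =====

-- B replaces A's right-to-left recursion (with repeated slicing) by a single iterative
-- backward carry scan over the character list; objective: alternative decomposition.


-- ===== PORT A =====
-- A's recursion, transliterated on the char list: prefix[-1] is getLast, prefix[:-1] is dropLast.
def set_prefix_core (p : List Char) : List Char :=
  if h : p = [] then ['A']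
  else
    let ending := (p.getLast h).toNat + 1
    if ending > 90 then
      (if p.length > 1 then set_prefix_core p.dropLast else ['A']) ++ ['A']
    else
      p.dropLast ++ [Char.ofNat ending]
termination_by p.length
decreasing_by simp [List.length_dropLast]; omega

def set_prefix (prefix_ : String) : String := String.mk (set_prefix_core prefix_.toList)

-- ===== PORT B =====
-- B's backward scan: process the REVERSED char list front-to-back; the Bool is true iff the
-- carry ran off the front (then the caller prepends 'A', matching Source B's final return).
def set_prefix_alt_scan : List Char → (List Char × Bool)
  | [] => ([], true)
  | c :: rest =>
    if c.toNat + 1 > 90 then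
      let r := set_prefix_alt_scan rest
      ('A' :: r.1, r.2)
    else
      (Char.ofNat (c.toNat + 1) :: rest, false)

def set_prefix_alt (prefix_ : String) : String :=
  if prefix_.toList = [] then "A"
  else
    let r := set_prefix_alt_scan prefix_.toList.reverse
    if r.2 then String.mk ('A' :: r.1.reverse) else String.mk r.1.reverse

-- ===== PRECONDITION & SPEC =====
def Spec_set_prefix (prefix_ : String) (out : String) : Prop := out = set_prefix_alt prefix_
instance (prefix_ : String) (out : String) : Decidable (Spec_set_prefix prefix_ out) := by unfold Spec_set_prefix; infer_instance

-- ===== CLAIM (what is proved, stated in full; the proofs are below) =====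
def Claim_equal_set_prefix : Prop := ∀ (prefix_ : String), Dom_set_prefix prefix_ → Spec_set_prefix prefix_ (set_prefix prefix_)

-- ===== LEMMAS AND PROOFS =====

lemma core_eq_scan (p : List Char) :
    set_prefix_core p =
      (let r := set_prefix_alt_scan p.reverse
       if r.2 then 'A' :: r.1.reverse else r.1.reverse) := by
  induction p using List.reverseRecOn with
  | nil => simp [set_prefix_core, set_prefix_alt_scan]
  | append_singleton q c ih =>
    rw [set_prefix_core]
    have hne : q ++ [c] ≠ [] := by simp
    simp only [dif_neg hne, List.getLast_append_singleton, List.dropLast_concat,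
      List.reverse_append, List.reverse_singleton, List.singleton_append]
    rw [set_prefix_alt_scan]
    by_cases hc : c.toNat + 1 > 90
    · simp only [if_pos hc]
      by_cases hq : q = []
      · subst hq
        simp [set_prefix_alt_scan]
      · have hlen : (q ++ [c]).length > 1 := by
          cases q with
          | nil => exact absurd rfl hq
          | cons a as => simp
        simp only [if_pos hlen, ih]
        cases hr : set_prefix_alt_scan q.reverse with
        | mk r b => cases b <;> simp
    · simp [hc]

theorem core_string (s : String) :
    set_prefix s = set_prefix_alt s := by
  unfold set_prefix set_prefix_alt
  by_cases h : s.toList = []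
  · rw [if_pos h, h]
    simp [set_prefix_core]; rfl
  · rw [if_neg h, core_eq_scan]
    cases hr : set_prefix_alt_scan s.toList.reverse with
    | mk r b => cases b <;> simp

-- ===== VERDICT (by name: the statement is the Claim_ definition above) =====
theorem set_prefix_spec : Claim_equal_set_prefix := by
  intro p _
  unfold Spec_set_prefix
  exact core_string p
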